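-- pv_equiv track=rewrite | github.com/EH30/encodeaz | old_cencodeaz/encodeaz.py | chrdecode
-- ===== SOURCE A (Python) =====
-- def chrdecode(text):#Don't use this
--     output_str = ""
--     strs = ""
--     strslist = list(text)
--
--     for i in strslist:
--         strs += chr((ord(i) - 12))
--
--     strslists = list(strs)
--
--     for output in strslists:
--         output_str += output
--
--
--     return output_str[::-1]
-- ===== SOURCE B (Python) =====
-- def chrdecode(text):
--     # Divide and conquer: the shifted reversal of the whole string is the
--     # shifted reversal of the right half followed by that of the left half.
--     if len(text) == 0:
--         return ""
--     if len(text) == 1: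
--         return chr(ord(text) - 12)
--     mid = len(text) // 2
--     return chrdecode(text[mid:]) + chrdecode(text[:mid])
-- ===== Notes on version B (the rewrite author's own statement) =====
-- stated objective: alternative
-- what changed: Replaces A's two linear accumulation loops plus final slice reversal by a divide-and-conquer recursion on string halves that produces the reversed, shifted string directly (right half's result followed by the left half's), with no explicit reverse step.
import Mathlib
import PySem

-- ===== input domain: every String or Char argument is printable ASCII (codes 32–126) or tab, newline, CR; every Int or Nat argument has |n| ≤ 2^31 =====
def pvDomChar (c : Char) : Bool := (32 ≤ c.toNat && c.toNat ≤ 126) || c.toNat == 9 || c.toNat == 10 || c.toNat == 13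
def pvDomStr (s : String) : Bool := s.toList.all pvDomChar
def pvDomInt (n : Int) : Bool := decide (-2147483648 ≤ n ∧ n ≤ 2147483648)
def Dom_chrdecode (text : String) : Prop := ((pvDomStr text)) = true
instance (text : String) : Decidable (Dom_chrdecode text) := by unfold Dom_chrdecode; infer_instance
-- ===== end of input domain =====

-- B replaces A's two accumulation loops plus final reversal by a divide-and-conquer
-- recursion on string halves that builds the reversed shifted string directly (alternative).

-- ===== PORT A =====
-- strings are ported as their List Char contents, wrapped with String.ofList at the end
def chrdecode (text : String) : String :=
  let strslist := text.toList
  let strs := strslist.foldl (fun acc i => acc ++ [Char.ofNat (i.toNat - 12)]) []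
  let strslists := strs
  let output_str := strslists.foldl (fun acc output => acc ++ [output]) []
  String.ofList output_str.reverse   -- output_str[::-1]

-- ===== PORT B =====
-- recursion on the char list; text[mid:] / text[:mid] via PySem.List.slice
def chrdecodeAltCore (l : List Char) : List Char :=
  if _h0 : l.length = 0 then []
  else if _h1 : l.length = 1 then [Char.ofNat (l.headI.toNat - 12)]
  else
    chrdecodeAltCore (PySem.List.slice l (some ((l.length / 2 : Nat) : Int)) none) ++
      chrdecodeAltCore (PySem.List.slice l none (some ((l.length / 2 : Nat) : Int)))
  termination_by l.length
  decreasing_by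
  · rw [PySem.List.slice_from_natCast]; simp; omega
  · rw [PySem.List.slice_to_natCast]; simp; omega

def chrdecode_alt (text : String) : String :=
  String.ofList (chrdecodeAltCore text.toList)

-- ===== PRECONDITION & SPEC =====
-- Pre_ excludes strings containing a character with code < 12 (tab/newline/CR in Dom):
-- there Python's chr(ord(c) - 12) raises ValueError in both A and B.
def Pre_chrdecode (text : String) : Prop := (text.toList.all (fun c => 12 ≤ c.toNat)) = true
instance (text : String) : Decidable (Pre_chrdecode text) := by unfold Pre_chrdecode; infer_instance
def pvWitness_chrdecode : String := "az"
def Spec_chrdecode (text : String) (out : String) : Prop := out = chrdecode_alt text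
instance (text : String) (out : String) : Decidable (Spec_chrdecode text out) := by unfold Spec_chrdecode; infer_instance

-- ===== CLAIM (what is proved, stated in full; the proofs are below) =====
def Claim_equal_chrdecode : Prop := ∀ (text : String), Dom_chrdecode text → Pre_chrdecode text → Spec_chrdecode text (chrdecode text)

-- ===== LEMMAS AND PROOFS =====

-- A's first loop: append-fold is a map
theorem foldl_append_map (l : List Char) (f : Char → Char) (acc : List Char) :
    l.foldl (fun acc i => acc ++ [f i]) acc = acc ++ l.map f := by
  induction l generalizing acc with
  | nil => simp
  | cons x xs ih => simp [List.foldl, ih]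

-- B's divide-and-conquer computes the reversed shifted list
theorem altCore_eq (l : List Char) :
    chrdecodeAltCore l = (l.map (fun c => Char.ofNat (c.toNat - 12))).reverse := by
  induction l using chrdecodeAltCore.induct with
  | case1 l h0 =>
    rw [chrdecodeAltCore]
    simp [List.length_eq_zero_iff.mp h0]
  | case2 l h0 h1 =>
    rw [chrdecodeAltCore]
    obtain ⟨c, rfl⟩ := List.length_eq_one_iff.mp h1
    simp [h1]
  | case3 l h0 h1 ih1 ih2 =>
    rw [chrdecodeAltCore]
    simp only [h0, h1, dite_false] at *
    rw [ih1, ih2,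
        PySem.List.slice_from_natCast, PySem.List.slice_to_natCast]
    rw [← List.reverse_append, ← List.map_append, List.take_append_drop]

-- ===== VERDICT (by name: the statement is the Claim_ definition above) =====
theorem chrdecode_spec : Claim_equal_chrdecode := by
  intro text _ _
  unfold Spec_chrdecode chrdecode chrdecode_alt
  rw [altCore_eq]
  simp only [foldl_append_map, List.nil_append, List.map_id_fun', id]
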